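-- pv_equiv track=rewrite | github.com/grolarkim/python_algorithm_prac | 2021/06_algofun.py | one_number
-- ===== SOURCE A (Python) =====
-- def one_number(number):
--     cnt = 99
--     if number < 100:
--         return number
--     elif number >= 100 and number <= 1000:
--         for i in range(100, number+1):
--             a = str(i)
--             if int(a[0]) - int(a[1]) == int(a[1]) - int(a[2]):
--                 cnt += 1
--     return cnt
-- ===== SOURCE B (Python) =====
-- def one_number(number):
--     if number < 100:
--         return number
--     if number > 1000:
--         return 99
--     cnt = 0
--     for d0 in range(1, 10):
--         for d in range(-9, 10):
--             d1 = d0 + d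
--             d2 = d0 + 2 * d
--             if 0 <= d1 <= 9 and 0 <= d2 <= 9:
--                 num = 100 * d0 + 10 * d1 + d2
--                 if num <= number:
--                     cnt += 1
--     return 99 + cnt
-- ===== Notes on version B (the rewrite author's own statement) =====
-- stated objective: alternative
-- what changed: Instead of scanning every integer in the accepted range and testing its digit string, B directly enumerates the 45 three-digit arithmetic-progression numbers from a leading digit and a common difference over a fixed grid of digit parameters and counts those not exceeding the input, keeping A's two guard branches.
import Mathlib
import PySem

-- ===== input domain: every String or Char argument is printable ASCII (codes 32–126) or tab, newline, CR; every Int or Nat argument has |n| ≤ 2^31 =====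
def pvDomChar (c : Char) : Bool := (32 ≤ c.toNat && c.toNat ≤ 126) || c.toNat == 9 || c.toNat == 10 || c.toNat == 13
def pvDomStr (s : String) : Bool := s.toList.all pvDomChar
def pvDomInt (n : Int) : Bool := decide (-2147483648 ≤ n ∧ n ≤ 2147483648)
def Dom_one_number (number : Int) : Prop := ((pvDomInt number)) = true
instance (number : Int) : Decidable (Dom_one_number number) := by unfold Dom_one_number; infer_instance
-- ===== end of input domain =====

-- B replaces A's scan of every integer in the accepted range (a string conversion and digit
-- parsing per integer) by a direct enumeration of the 45 three-digit arithmetic-progression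
-- numbers from digit parameters, counting those ≤ number; A's two guard branches are kept.

-- ===== PORT A =====
-- int(a[k]) in A: the index is always in range and the character is always a digit for the
-- i ≥ 100 reached by the loop, so the `none`/parse-failure defaults below are never used (exact).
def digitAt (a : String) (k : Int) : Int :=
  match PySem.Str.pyGet? a k with
  | some c => (PySem.Int.ofStr? (String.ofList [c])).getD 0
  | none => 0

def one_number (number : Int) : Int :=
  let cnt : Int := 99
  if number < 100 then number
  else if number ≥ 100 ∧ number ≤ 1000 then
    (PySem.List.pyRange 100 (number + 1) 1).foldl (fun cnt i =>
      let a := PySem.Int.toStr i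
      if digitAt a 0 - digitAt a 1 = digitAt a 1 - digitAt a 2 then cnt + 1 else cnt) cnt
  else cnt

-- ===== PORT B =====
def one_number_alt (number : Int) : Int :=
  if number < 100 then number
  else if number > 1000 then 99
  else
    let cnt := (PySem.List.pyRange 1 10 1).foldl (fun cnt d0 =>
      (PySem.List.pyRange (-9) 10 1).foldl (fun cnt d =>
        let d1 := d0 + d
        let d2 := d0 + 2 * d
        if 0 ≤ d1 ∧ d1 ≤ 9 ∧ 0 ≤ d2 ∧ d2 ≤ 9 then
          let num := 100 * d0 + 10 * d1 + d2
          if num ≤ number then cnt + 1 else cnt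
        else cnt) cnt) 0
    99 + cnt

-- ===== PRECONDITION & SPEC =====
def Spec_one_number (number : Int) (out : Int) : Prop := out = one_number_alt number
instance (number : Int) (out : Int) : Decidable (Spec_one_number number out) := by unfold Spec_one_number; infer_instance

-- ===== CLAIM (what is proved, stated in full; the proofs are below) =====
def Claim_equal_one_number : Prop := ∀ (number : Int), Dom_one_number number → Spec_one_number number (one_number number)

-- ===== LEMMAS AND PROOFS =====

-- the 45 three-digit arithmetic-progression numbers, in B's enumeration order (sorted)
def Lnums : List Int := [111, 123, 135, 147, 159, 210, 222, 234, 246, 258, 321, 333, 345, 357, 369, 420, 432, 444, 456, 468, 531, 543, 555, 567, 579, 630, 642, 654, 666, 678, 741, 753, 765, 777, 789, 840, 852, 864, 876, 888, 951, 963, 975, 987, 999]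

-- number of elements of Lnums that are ≤ n, as the fold B's loop produces
def cntL (n : Int) : Int :=
  Lnums.foldl (fun c x => if x ≤ n then c + 1 else c) 0

-- A's loop condition at 101+k holds exactly when 101+k is in Lnums (checked over all 900 values)
set_option maxHeartbeats 4000000 in
set_option maxRecDepth 40000 in
theorem charP : ∀ k : ℕ, k < 900 →
    (digitAt (PySem.Int.toStr (101 + (k : Int))) 0 - digitAt (PySem.Int.toStr (101 + (k : Int))) 1
      = digitAt (PySem.Int.toStr (101 + (k : Int))) 1 - digitAt (PySem.Int.toStr (101 + (k : Int))) 2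
      ↔ (101 + (k : Int)) ∈ Lnums) := by
  decide

theorem foldl_cnt (n : Int) (l : List Int) (c0 : Int) :
    l.foldl (fun c x => if x ≤ n then c + 1 else c) c0 = c0 + l.countP (fun x => decide (x ≤ n)) := by
  induction l generalizing c0 with
  | nil => simp
  | cons x xs ih =>
    simp only [List.foldl_cons, List.countP_cons, ih]
    by_cases h : x ≤ n <;> simp [h] <;> ring

-- B's inner loop over the differences d, for a fixed leading digit d0
theorem inner_fold (n d0 : Int) (l : List Int) (c0 : Int) :
    l.foldl (fun c d =>
        if 0 ≤ d0 + d ∧ d0 + d ≤ 9 ∧ 0 ≤ d0 + 2 * d ∧ d0 + 2 * d ≤ 9 then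
          (if 100 * d0 + 10 * (d0 + d) + (d0 + 2 * d) ≤ n then c + 1 else c)
        else c) c0
    = c0 + ((l.filter (fun d => decide (0 ≤ d0 + d ∧ d0 + d ≤ 9 ∧ 0 ≤ d0 + 2 * d ∧ d0 + 2 * d ≤ 9))).map
        (fun d => 100 * d0 + 10 * (d0 + d) + (d0 + 2 * d))).countP (fun y => decide (y ≤ n)) := by
  induction l generalizing c0 with
  | nil => simp
  | cons d ds ih =>
    simp only [List.foldl_cons, List.filter_cons, ih]
    by_cases hv : 0 ≤ d0 + d ∧ d0 + d ≤ 9 ∧ 0 ≤ d0 + 2 * d ∧ d0 + 2 * d ≤ 9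
    · simp only [if_pos hv, decide_eq_true hv, List.map_cons, List.countP_cons]
      by_cases hle : 100 * d0 + 10 * (d0 + d) + (d0 + 2 * d) ≤ n
      · simp [hle]; push_cast; ring
      · simp [hle]
    · simp [hv]

-- the outer loop only shifts the accumulator by a per-element amount
theorem outer_fold (l : List Int) (g : Int → Int → Int) (h : Int → Int)
    (hg : ∀ c d0, g c d0 = c + h d0) (c0 : Int) :
    l.foldl g c0 = c0 + (l.map h).sum := by
  induction l generalizing c0 with
  | nil => simp
  | cons d0 ds ih => simp only [List.foldl_cons, List.map_cons, List.sum_cons, hg, ih]; ring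

theorem sum_countP_flatMap (ls : List Int) (F : Int → List Int) (p : Int → Bool) :
    (ls.map (fun d0 => (((F d0).countP p : ℕ) : Int))).sum = (((ls.flatMap F).countP p : ℕ) : Int) := by
  induction ls with
  | nil => simp
  | cons d0 ds ih => simp [List.countP_append, ih]

theorem alt_in_range (n : Int) (h1 : ¬ n < 100) (h2 : ¬ n > 1000) :
    one_number_alt n = 99 + cntL n := by
  unfold one_number_alt
  rw [if_neg h1, if_neg h2]
  show 99 + (PySem.List.pyRange 1 10 1).foldl (fun cnt d0 =>
      (PySem.List.pyRange (-9) 10 1).foldl (fun c d =>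
        if 0 ≤ d0 + d ∧ d0 + d ≤ 9 ∧ 0 ≤ d0 + 2 * d ∧ d0 + 2 * d ≤ 9 then
          (if 100 * d0 + 10 * (d0 + d) + (d0 + 2 * d) ≤ n then c + 1 else c)
        else c) cnt) 0 = 99 + cntL n
  rw [outer_fold _ _
      (fun d0 => (((((PySem.List.pyRange (-9) 10 1).filter
          (fun d => decide (0 ≤ d0 + d ∧ d0 + d ≤ 9 ∧ 0 ≤ d0 + 2 * d ∧ d0 + 2 * d ≤ 9))).map
          (fun d => 100 * d0 + 10 * (d0 + d) + (d0 + 2 * d))).countP (fun y => decide (y ≤ n)) : ℕ) : Int))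
      (fun c d0 => inner_fold n d0 (PySem.List.pyRange (-9) 10 1) c)]
  rw [sum_countP_flatMap]
  have hflat : ((PySem.List.pyRange 1 10 1).flatMap (fun d0 =>
      ((PySem.List.pyRange (-9) 10 1).filter
          (fun d => decide (0 ≤ d0 + d ∧ d0 + d ≤ 9 ∧ 0 ≤ d0 + 2 * d ∧ d0 + 2 * d ≤ 9))).map
          (fun d => 100 * d0 + 10 * (d0 + d) + (d0 + 2 * d)))) = Lnums := by decide
  rw [hflat, cntL, foldl_cnt]

theorem countP_succ (m : Int) (l : List Int) (hl : l.Nodup) :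
    l.countP (fun x => decide (x ≤ m + 1)) =
      l.countP (fun x => decide (x ≤ m)) + (if (m + 1) ∈ l then 1 else 0) := by
  induction l with
  | nil => simp
  | cons x xs ih =>
    have hni : x ∉ xs := (List.nodup_cons.mp hl).1
    have ih' := ih (List.nodup_cons.mp hl).2
    simp only [List.countP_cons, List.mem_cons, ih']
    by_cases hxm : m + 1 = x
    · have h1 : (decide (x ≤ m + 1)) = true := by simp; omega
      have h2 : (decide (x ≤ m)) = false := by simp; omega
      have h3 : (m + 1) ∉ xs := hxm ▸ hni
      simp [h1, h2, h3, hxm, hni]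
    · have he : (decide (x ≤ m + 1)) = (decide (x ≤ m)) := by
        by_cases h : x ≤ m
        · simp; omega
        · simp; omega
      simp only [he, hxm, false_or]
      split_ifs <;> omega

theorem cntL_succ (m : Int) : cntL (m + 1) = cntL m + (if (m + 1) ∈ Lnums then 1 else 0) := by
  have hd : Lnums.Nodup := by decide
  simp only [cntL, foldl_cnt, countP_succ m Lnums hd]
  push_cast
  split <;> ring

-- A's loop value equals 99 + cntL, for every endpoint 100 + k with k ≤ 900
theorem aloop_eq : ∀ k : ℕ, k ≤ 900 →
    (PySem.List.pyRange 100 (100 + (k : Int) + 1) 1).foldl (fun cnt i =>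
      let a := PySem.Int.toStr i
      if digitAt a 0 - digitAt a 1 = digitAt a 1 - digitAt a 2 then cnt + 1 else cnt) 99
    = 99 + cntL (100 + (k : Int)) := by
  intro k hk
  induction k with
  | zero => decide
  | succ k ih =>
    have hk' : k ≤ 900 := by omega
    have hlt : k < 900 := by omega
    have hstep : (100 : Int) ≤ 100 + (k : Int) + 1 := by omega
    have hr : PySem.List.pyRange 100 (100 + ((k : ℕ) + 1 : ℕ) + 1) 1
        = PySem.List.pyRange 100 (100 + (k : Int) + 1) 1 ++ [100 + (k : Int) + 1] := by
      push_cast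
      have e0 : (100 : Int) + ((k : Int) + 1) + 1 = (100 + (k : Int) + 1) + 1 := by ring
      rw [e0]
      exact PySem.List.pyRange_one_succ_right hstep
    rw [hr, List.foldl_append, ih hk']
    simp only [List.foldl_cons, List.foldl_nil]
    have hch := charP k hlt
    have e1 : (101 : Int) + (k : Int) = 100 + (k : Int) + 1 := by ring
    rw [e1] at hch
    have hcnt := cntL_succ (100 + (k : Int))
    push_cast
    have e2 : (100 : Int) + ((k : Int) + 1) = 100 + (k : Int) + 1 := by ring
    rw [e2, hcnt]
    by_cases hm : (100 + (k : Int) + 1) ∈ Lnums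
    · rw [if_pos (hch.mpr hm), if_pos hm]
      ring
    · rw [if_neg (fun hc => hm (hch.mp hc)), if_neg hm]
      ring

-- ===== VERDICT (by name: the statement is the Claim_ definition above) =====
theorem one_number_spec : Claim_equal_one_number := by
  intro number _
  unfold Spec_one_number one_number
  by_cases h1 : number < 100
  · simp [one_number_alt, h1]
  · by_cases h2 : number > 1000
    · have : ¬ (number ≥ 100 ∧ number ≤ 1000) := by omega
      simp only [if_neg h1, if_neg this, one_number_alt, if_pos h2]
    · have hin : number ≥ 100 ∧ number ≤ 1000 := by omega
      simp only [if_neg h1, if_pos hin]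
      obtain ⟨k, hk, rfl⟩ : ∃ k : ℕ, k ≤ 900 ∧ number = 100 + (k : Int) :=
        ⟨(number - 100).toNat, by omega, by omega⟩
      rw [alt_in_range _ h1 h2]
      exact aloop_eq k hk
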